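-- pv_equiv track=rewrite | github.com/Cheenya/zbx-hg-grafana-migration | v3/grafana_audit.py | _pick_mapping_by_old_group
-- ===== SOURCE A (Python) =====
-- from collections import defaultdict
-- from typing import Any, Callable, Dict, Iterable, List, Sequence, Set, Tuple
--
-- def _mapping_row_priority(row: Dict[str, Any]) -> Tuple[int, int, int, str]:
--     selected = str(row.get("selected") or "").strip().lower() in {"1", "y", "yes", "true", "x"}
--     exists = str(row.get("target_exists") or "").strip().lower() == "yes"
--     manual = str(row.get("manual_required") or "").strip().lower() == "yes"
--     rank = int(row.get("candidate_rank") or 9999)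
--     return (
--         0 if selected else 1,
--         0 if exists else 1,
--         0 if not manual else 1,
--         rank,
--     )
--
-- def _pick_mapping_by_old_group(mapping_rows: Sequence[Dict[str, Any]] | None) -> Dict[str, Dict[str, Any]]:
--     by_old: Dict[str, List[Dict[str, Any]]] = defaultdict(list)
--     for row in mapping_rows or []:
--         old_group = str(row.get("old_group") or "").strip()
--         if old_group:
--             by_old[old_group].append(dict(row))
--     chosen: Dict[str, Dict[str, Any]] = {}
--     for old_group, rows in by_old.items():
--         rows.sort(key=lambda row: _mapping_row_priority(row))
--         chosen[old_group] = rows[0]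
--     return chosen
-- ===== SOURCE B (Python) =====
-- from typing import Any, Dict, Sequence, Tuple
--
--
-- def _mapping_row_priority(row: Dict[str, Any]) -> Tuple[int, int, int, str]:
--     selected = str(row.get("selected") or "").strip().lower() in {"1", "y", "yes", "true", "x"}
--     exists = str(row.get("target_exists") or "").strip().lower() == "yes"
--     manual = str(row.get("manual_required") or "").strip().lower() == "yes"
--     rank = int(row.get("candidate_rank") or 9999)
--     return (
--         0 if selected else 1,
--         0 if exists else 1,
--         0 if not manual else 1,
--         rank,
--     )
--
--
-- def _pick_mapping_by_old_group(mapping_rows):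
--     # One pass: keep the best (priority, row) per old_group; strict '<' so the
--     # first-seen row wins priority ties, like the stable sort's first element.
--     best: Dict[str, Tuple[Tuple[int, int, int, int], Dict[str, Any]]] = {}
--     for row in mapping_rows or []:
--         old_group = str(row.get("old_group") or "").strip()
--         if not old_group:
--             continue
--         p = _mapping_row_priority(row)
--         cur = best.get(old_group)
--         if cur is None or p < cur[0]:
--             best[old_group] = (p, dict(row))
--     return {g: r for g, (_, r) in best.items()}
-- ===== Notes on version B (the rewrite author's own statement) =====
-- stated objective: simpler
-- what changed: Replaces the defaultdict-of-lists grouping plus per-group stable sort with a single pass that keeps one best (priority, row) pair per old_group, using strict '<' so the first-seen row wins priority ties exactly like the stable sort's first element.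
import Mathlib
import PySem

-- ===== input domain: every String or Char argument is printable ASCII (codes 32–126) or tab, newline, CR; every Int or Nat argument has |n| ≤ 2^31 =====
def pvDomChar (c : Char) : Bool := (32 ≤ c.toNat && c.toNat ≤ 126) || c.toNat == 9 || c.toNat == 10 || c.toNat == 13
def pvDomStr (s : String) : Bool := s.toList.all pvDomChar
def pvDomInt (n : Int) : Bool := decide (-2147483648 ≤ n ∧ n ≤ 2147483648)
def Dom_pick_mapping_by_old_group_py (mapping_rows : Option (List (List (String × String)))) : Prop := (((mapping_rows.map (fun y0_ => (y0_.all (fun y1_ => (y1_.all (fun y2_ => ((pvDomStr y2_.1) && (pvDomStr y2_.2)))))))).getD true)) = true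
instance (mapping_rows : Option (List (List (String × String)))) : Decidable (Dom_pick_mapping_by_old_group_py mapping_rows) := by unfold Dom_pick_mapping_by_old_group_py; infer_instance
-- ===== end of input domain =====

-- B replaces A's defaultdict grouping + per-group stable sort by a single pass that keeps the
-- best (priority, row) pair per old_group under strict '<' (objective: simpler decomposition).

-- ===== PORT A =====
-- Python's (int,int,int,int) priority tuples compare lexicographically: modelled by Lex-nested Int pairs.
abbrev pvK : Type := Lex (Int × Lex (Int × Lex (Int × Int)))

-- shared helper _mapping_row_priority (rows are Python dicts: PySem.Dict built from the assoc list).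
-- int(...) may raise ValueError; Pre_ excludes exactly those inputs, so the .getD 0 arm is never reached there.
def mapping_row_priority_py (r : PySem.Dict String String) : pvK :=
  let selected := ["1", "y", "yes", "true", "x"].contains (PySem.Str.lower (PySem.Str.strip ((r.get? "selected").getD "")))
  let exists_ := PySem.Str.lower (PySem.Str.strip ((r.get? "target_exists").getD "")) == "yes"
  let manual := PySem.Str.lower (PySem.Str.strip ((r.get? "manual_required").getD "")) == "yes"
  let rankStr := (r.get? "candidate_rank").getD ""
  let rank : Int := if rankStr = "" then 9999 else (PySem.Int.ofStr? rankStr).getD 0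
  toLex ((if selected then 0 else 1),
    toLex ((if exists_ then 0 else 1),
      toLex ((if manual then 1 else 0), rank)))

def pick_mapping_by_old_group_py (mapping_rows : Option (List (List (String × String)))) : List (String × List (String × String)) :=
  let rows := mapping_rows.getD []
  let by_old : PySem.Dict String (List (PySem.Dict String String)) :=
    rows.foldl (fun d row =>
      let og := PySem.Str.strip (((PySem.Dict.ofList row).get? "old_group").getD "")
      if og = "" then d
      else d.insert og (d.getD og [] ++ [PySem.Dict.ofList row])) PySem.Dict.empty
  let chosen : PySem.Dict String (PySem.Dict String String) :=
    by_old.items.foldl (fun c p =>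
      c.insert p.1 (match PySem.List.sorted p.2 mapping_row_priority_py false with
        | r :: _ => r
        | [] => PySem.Dict.empty)) PySem.Dict.empty
  chosen.items.map (fun p => (p.1, p.2.items))

-- ===== PORT B =====
def pick_mapping_by_old_group_py_alt (mapping_rows : Option (List (List (String × String)))) : List (String × List (String × String)) :=
  let best : PySem.Dict String (pvK × PySem.Dict String String) :=
    (mapping_rows.getD []).foldl (fun b row =>
      let r := PySem.Dict.ofList row
      let og := PySem.Str.strip ((r.get? "old_group").getD "")
      if og = "" then b
      else
        let p := mapping_row_priority_py r
        match b.get? og with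
        | none => b.insert og (p, r)
        | some cur => if p < cur.1 then b.insert og (p, r) else b) PySem.Dict.empty
  (PySem.Dict.ofList (best.items.map (fun p => (p.1, p.2.2)))).items.map (fun p => (p.1, p.2.items))

-- ===== PRECONDITION & SPEC =====
-- Pre_ excludes exactly the inputs where Python A raises ValueError: a row with a nonempty
-- (stripped) old_group whose "candidate_rank" value is a nonempty string int() cannot parse.
def Pre_pick_mapping_by_old_group_py (mapping_rows : Option (List (List (String × String)))) : Prop :=
  ((mapping_rows.getD []).all (fun row =>
    let r := PySem.Dict.ofList row
    (PySem.Str.strip ((r.get? "old_group").getD "") == "") ||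
    (let v := (r.get? "candidate_rank").getD ""
     (v == "") || (PySem.Int.ofStr? v).isSome))) = true
instance (mapping_rows : Option (List (List (String × String)))) : Decidable (Pre_pick_mapping_by_old_group_py mapping_rows) := by unfold Pre_pick_mapping_by_old_group_py; infer_instance
def pvWitness_pick_mapping_by_old_group_py : (Option (List (List (String × String)))) :=
  some [[("old_group", " g1 "), ("candidate_rank", " 7 "), ("selected", "yes")],
        [("old_group", "g1"), ("candidate_rank", "2")],
        [("old_group", ""), ("candidate_rank", "zzz")]]
def Spec_pick_mapping_by_old_group_py (mapping_rows : Option (List (List (String × String)))) (out : List (String × List (String × String))) : Prop := out = pick_mapping_by_old_group_py_alt mapping_rows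
instance (mapping_rows : Option (List (List (String × String)))) (out : List (String × List (String × String))) : Decidable (Spec_pick_mapping_by_old_group_py mapping_rows out) := by unfold Spec_pick_mapping_by_old_group_py; infer_instance

-- ===== CLAIM (what is proved, stated in full; the proofs are below) =====
def Claim_equal_pick_mapping_by_old_group_py : Prop := ∀ (mapping_rows : Option (List (List (String × String)))), Dom_pick_mapping_by_old_group_py mapping_rows → Pre_pick_mapping_by_old_group_py mapping_rows → Spec_pick_mapping_by_old_group_py mapping_rows (pick_mapping_by_old_group_py mapping_rows)

-- ===== LEMMAS AND PROOFS =====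

-- proof-side abbreviations
def pvRowD (row : List (String × String)) : PySem.Dict String String := PySem.Dict.ofList row
def pvOG (row : List (String × String)) : String :=
  PySem.Str.strip (((PySem.Dict.ofList row).get? "old_group").getD "")

-- B's running minimum over a group, with an Option accumulator (none ↔ group not seen yet)
def pvSelStep (a : Option (pvK × PySem.Dict String String)) (r : PySem.Dict String String) :
    Option (pvK × PySem.Dict String String) :=
  match a with
  | none => some (mapping_row_priority_py r, r)
  | some cur => if mapping_row_priority_py r < cur.1 then some (mapping_row_priority_py r, r) else some cur
def pvSel (rs : List (PySem.Dict String String)) : Option (pvK × PySem.Dict String String) :=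
  rs.foldl pvSelStep none
def pvVal (a : Option (pvK × PySem.Dict String String)) : pvK × PySem.Dict String String :=
  a.getD (toLex (0, toLex (0, toLex (0, 0))), PySem.Dict.empty)

-- first-minimum fold: the row A's stable sort puts first
def pvMinFold (x : PySem.Dict String String) (t : List (PySem.Dict String String)) :
    PySem.Dict String String :=
  t.foldl (fun m y => if mapping_row_priority_py y < mapping_row_priority_py m then y else m) x

theorem pvSel_some_foldl (t : List (PySem.Dict String String)) (z : pvK × PySem.Dict String String) :
    t.foldl pvSelStep (some z) =
      some (t.foldl (fun cur r => if mapping_row_priority_py r < cur.1 then (mapping_row_priority_py r, r) else cur) z) := by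
  induction t generalizing z with
  | nil => rfl
  | cons y t ih =>
    simp only [List.foldl_cons, pvSelStep]
    by_cases h : mapping_row_priority_py y < z.1 <;> simp [h, ih]

theorem pvPairFold_eq (t : List (PySem.Dict String String)) (b : PySem.Dict String String) :
    t.foldl (fun cur r => if mapping_row_priority_py r < cur.1 then (mapping_row_priority_py r, r) else cur)
        (mapping_row_priority_py b, b) =
      (mapping_row_priority_py (pvMinFold b t), pvMinFold b t) := by
  induction t generalizing b with
  | nil => rfl
  | cons y t ih =>
    have hm : pvMinFold b (y :: t) =
        pvMinFold (if mapping_row_priority_py y < mapping_row_priority_py b then y else b) t := by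
      by_cases h : mapping_row_priority_py y < mapping_row_priority_py b <;> simp [pvMinFold, h]
    rw [hm, List.foldl_cons]
    by_cases h : mapping_row_priority_py y < mapping_row_priority_py b <;> simp only [h, if_true, if_false] <;> exact ih _

theorem pvSel_cons (x : PySem.Dict String String) (t : List (PySem.Dict String String)) :
    pvSel (x :: t) = some (mapping_row_priority_py (pvMinFold x t), pvMinFold x t) := by
  simp only [pvSel, List.foldl_cons, pvSelStep]
  rw [pvSel_some_foldl, pvPairFold_eq]

theorem pvHead_insertBy (c : PySem.Dict String String → PySem.Dict String String → Bool)
    (y m : PySem.Dict String String) (r : List (PySem.Dict String String)) :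
    (PySem.List.insertBy c y (m :: r)).head? = some (if c y m then y else m) := by
  by_cases h : c y m <;> simp [PySem.List.insertBy, h]

theorem pvSorted_head (x : PySem.Dict String String) (t : List (PySem.Dict String String)) :
    (PySem.List.sorted (x :: t) mapping_row_priority_py false).head? = some (pvMinFold x t) := by
  induction t using List.reverseRecOn with
  | nil => rfl
  | append_singleton t y ih =>
    have hnil : PySem.List.sorted (x :: t) mapping_row_priority_py false ≠ [] := by
      simp [PySem.List.sorted_eq_nil_iff]
    obtain ⟨m, rest, hmr⟩ := List.exists_cons_of_ne_nil hnil
    rw [hmr] at ih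
    simp only [List.head?_cons, Option.some.injEq] at ih
    have hsort : PySem.List.sorted (x :: (t ++ [y])) mapping_row_priority_py false =
        PySem.List.insertBy (fun a b => decide (mapping_row_priority_py a < mapping_row_priority_py b)) y
          (PySem.List.sorted (x :: t) mapping_row_priority_py false) := by
      rw [PySem.List.sorted_eq_foldl_insertBy, PySem.List.sorted_eq_foldl_insertBy]
      simp [List.foldl_append]
    rw [hsort, hmr, pvHead_insertBy, ih]
    simp only [pvMinFold, List.foldl_append, List.foldl_cons, List.foldl_nil]
    by_cases h : mapping_row_priority_py y < mapping_row_priority_py (pvMinFold x t) <;>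
      simp [h, pvMinFold]

-- the two grouping folds, over the already-filtered row list
def pvStepA (d : PySem.Dict String (List (PySem.Dict String String))) (row : List (String × String)) :
    PySem.Dict String (List (PySem.Dict String String)) :=
  d.insert (pvOG row) (d.getD (pvOG row) [] ++ [pvRowD row])
def pvStepB (b : PySem.Dict String (pvK × PySem.Dict String String)) (row : List (String × String)) :
    PySem.Dict String (pvK × PySem.Dict String String) :=
  match b.get? (pvOG row) with
  | none => b.insert (pvOG row) (mapping_row_priority_py (pvRowD row), pvRowD row)
  | some cur =>
      if mapping_row_priority_py (pvRowD row) < cur.1 then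
        b.insert (pvOG row) (mapping_row_priority_py (pvRowD row), pvRowD row)
      else b

-- main invariant: B's dict is the image of A's group dict under pvSel, and groups are nonempty
theorem pvInv (l : List (List (String × String)))
    (dA : PySem.Dict String (List (PySem.Dict String String)))
    (dB : PySem.Dict String (pvK × PySem.Dict String String))
    (hnd : dA.keys.Nodup)
    (hne : ∀ p ∈ dA.items, p.2 ≠ [])
    (hmap : dB.items = dA.items.map (fun p => (p.1, pvVal (pvSel p.2)))) :
    (l.foldl pvStepB dB).items =
      (l.foldl pvStepA dA).items.map (fun p => (p.1, pvVal (pvSel p.2))) ∧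
    (l.foldl pvStepA dA).keys.Nodup ∧
    (∀ p ∈ (l.foldl pvStepA dA).items, p.2 ≠ []) := by
  induction l generalizing dA dB with
  | nil => exact ⟨hmap, hnd, hne⟩
  | cons row l ih =>
    simp only [List.foldl_cons]
    have hkeys : dB.keys = dA.keys := by
      simp only [PySem.Dict.keys, hmap, List.map_map]
      rfl
    cases h : dA.get? (pvOG row) with
    | none =>
      have hgk : pvOG row ∉ dA.keys := (PySem.Dict.get?_eq_none_iff_not_mem_keys dA _).1 h
      have hcA : dA.contains (pvOG row) = false := by
        rw [PySem.Dict.contains_eq_isSome_get?, h]; rfl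
      have hBn : dB.get? (pvOG row) = none :=
        (PySem.Dict.get?_eq_none_iff_not_mem_keys dB _).2 (by rw [hkeys]; exact hgk)
      have hcB : dB.contains (pvOG row) = false := by
        rw [PySem.Dict.contains_eq_isSome_get?, hBn]; rfl
      have hsA : pvStepA dA row = dA.insert (pvOG row) [pvRowD row] := by
        simp [pvStepA, PySem.Dict.getD_of_not_contains dA _ hcA]
      have hsB : pvStepB dB row = dB.insert (pvOG row) (mapping_row_priority_py (pvRowD row), pvRowD row) := by
        simp [pvStepB, hBn]
      rw [hsA, hsB]
      apply ih
      · exact PySem.Dict.nodup_keys_insert _ _ _ hnd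
      · intro p hp
        rw [PySem.Dict.items_insert_of_not_contains dA _ hcA] at hp
        rcases List.mem_append.1 hp with hp | hp
        · exact hne p hp
        · simp only [List.mem_singleton] at hp
          subst hp; simp
      · rw [PySem.Dict.items_insert_of_not_contains dA _ hcA,
            PySem.Dict.items_insert_of_not_contains dB _ hcB, hmap, List.map_append]
        rfl
    | some rs =>
      have hmem : (pvOG row, rs) ∈ dA.items := (PySem.Dict.get?_eq_some_iff_mem_items dA _ _ hnd).1 h
      have hndB : dB.keys.Nodup := by rw [hkeys]; exact hnd
      have hrsne : rs ≠ [] := hne _ hmem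
      obtain ⟨x, t, rfl⟩ := List.exists_cons_of_ne_nil hrsne
      have hselrs : pvSel (x :: t) =
          some (mapping_row_priority_py (pvMinFold x t), pvMinFold x t) := pvSel_cons x t
      have hBg : dB.get? (pvOG row) = some (mapping_row_priority_py (pvMinFold x t), pvMinFold x t) := by
        apply PySem.Dict.get?_of_mem_items dB _ hndB
        rw [hmap]
        refine List.mem_map.2 ⟨(pvOG row, x :: t), hmem, ?_⟩
        simp [hselrs, pvVal]
      have hcA : dA.contains (pvOG row) = true := by
        rw [PySem.Dict.contains_eq_isSome_get?, h]; rfl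
      have hcB : dB.contains (pvOG row) = true := by
        rw [PySem.Dict.contains_eq_isSome_get?, hBg]; rfl
      have hsA : pvStepA dA row = dA.insert (pvOG row) ((x :: t) ++ [pvRowD row]) := by
        simp [pvStepA, PySem.Dict.getD_of_get?_eq_some dA _ h]
      have hrep : ∀ p ∈ dA.items, p.1 = pvOG row → p = (pvOG row, x :: t) := by
        intro p hp hpe
        exact List.inj_on_of_nodup_map hnd hp hmem hpe
      have hselapp : pvSel (x :: (t ++ [pvRowD row])) = pvSelStep (pvSel (x :: t)) (pvRowD row) := by
        simp [pvSel, List.foldl_append]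
      have hndA' : (pvStepA dA row).keys.Nodup := by
        rw [hsA]; exact PySem.Dict.nodup_keys_insert _ _ _ hnd
      have hneA' : ∀ p ∈ (pvStepA dA row).items, p.2 ≠ [] := by
        intro p hp
        rw [hsA, PySem.Dict.items_insert_of_contains dA _ hcA] at hp
        obtain ⟨q, hq, hqe⟩ := List.mem_map.1 hp
        by_cases hq1 : (q.1 == pvOG row) = true
        · rw [if_pos hq1] at hqe; rw [← hqe]; simp
        · rw [if_neg hq1] at hqe; rw [← hqe]; exact hne q hq
      by_cases hlt : mapping_row_priority_py (pvRowD row) < mapping_row_priority_py (pvMinFold x t)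
      · have hsB : pvStepB dB row =
            dB.insert (pvOG row) (mapping_row_priority_py (pvRowD row), pvRowD row) := by
          simp [pvStepB, hBg, hlt]
        rw [hsA, hsB]
        apply ih _ _ (by rw [← hsA]; exact hndA') (by rw [← hsA]; exact hneA')
        rw [PySem.Dict.items_insert_of_contains dA _ hcA,
            PySem.Dict.items_insert_of_contains dB _ hcB, hmap, List.map_map, List.map_map]
        apply List.map_congr_left
        intro p hp
        by_cases hpg : p.1 = pvOG row
        · have hpeq := hrep p hp hpg
          subst hpeq
          simp [Function.comp, pvVal]
          rw [hselapp, hselrs]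
          simp [pvSelStep, hlt]
        · have hbe : (p.1 == pvOG row) = false := beq_eq_false_iff_ne.2 hpg
          simp [Function.comp, hbe]
      · have hsB : pvStepB dB row = dB := by
          simp [pvStepB, hBg, hlt]
        rw [hsA, hsB]
        apply ih _ _ (by rw [← hsA]; exact hndA') (by rw [← hsA]; exact hneA')
        rw [PySem.Dict.items_insert_of_contains dA _ hcA, hmap, List.map_map]
        apply List.map_congr_left
        intro p hp
        by_cases hpg : p.1 = pvOG row
        · have hpeq := hrep p hp hpg
          subst hpeq
          simp [Function.comp, pvVal]
          rw [hselapp, hselrs]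
          simp [pvSelStep, hlt]
        · have hbe : (p.1 == pvOG row) = false := beq_eq_false_iff_ne.2 hpg
          simp [Function.comp, hbe]

-- the guarded folds of the two ports are the pvStep folds over the filtered row list
theorem pvFoldA_eq (rows : List (List (String × String))) :
    rows.foldl (fun d row =>
        let og := PySem.Str.strip (((PySem.Dict.ofList row).get? "old_group").getD "")
        if og = "" then d
        else d.insert og (d.getD og [] ++ [PySem.Dict.ofList row])) PySem.Dict.empty
      = (rows.filter (fun row => !(pvOG row == ""))).foldl pvStepA PySem.Dict.empty := by
  rw [List.foldl_filter]
  congr 1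
  funext d row
  by_cases h : pvOG row = "" <;> simp [pvOG, pvStepA, pvRowD] at h ⊢

theorem pvFoldB_eq (rows : List (List (String × String))) :
    rows.foldl (fun b row =>
        let r := PySem.Dict.ofList row
        let og := PySem.Str.strip ((r.get? "old_group").getD "")
        if og = "" then b
        else
          let p := mapping_row_priority_py r
          match b.get? og with
          | none => b.insert og (p, r)
          | some cur => if p < cur.1 then b.insert og (p, r) else b) PySem.Dict.empty
      = (rows.filter (fun row => !(pvOG row == ""))).foldl pvStepB PySem.Dict.empty := by
  rw [List.foldl_filter]
  congr 1
  funext b row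
  by_cases h : pvOG row = "" <;> simp [pvOG, pvStepB, pvRowD] at h ⊢

theorem pick_mapping_by_old_group_py_spec_aux :
    ∀ (mapping_rows : Option (List (List (String × String)))),
      pick_mapping_by_old_group_py mapping_rows = pick_mapping_by_old_group_py_alt mapping_rows := by
  intro mr
  have hA : pick_mapping_by_old_group_py mr =
      (((mr.getD []).foldl (fun d row =>
          let og := PySem.Str.strip (((PySem.Dict.ofList row).get? "old_group").getD "")
          if og = "" then d
          else d.insert og (d.getD og [] ++ [PySem.Dict.ofList row])) PySem.Dict.empty).items.foldl
        (fun c p => c.insert p.1 (match PySem.List.sorted p.2 mapping_row_priority_py false with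
          | r :: _ => r
          | [] => PySem.Dict.empty)) PySem.Dict.empty).items.map (fun p => (p.1, p.2.items)) := rfl
  have hB : pick_mapping_by_old_group_py_alt mr =
      (PySem.Dict.ofList (((mr.getD []).foldl (fun b row =>
          let r := PySem.Dict.ofList row
          let og := PySem.Str.strip ((r.get? "old_group").getD "")
          if og = "" then b
          else
            let p := mapping_row_priority_py r
            match b.get? og with
            | none => b.insert og (p, r)
            | some cur => if p < cur.1 then b.insert og (p, r) else b) PySem.Dict.empty).items.map
        (fun p => (p.1, p.2.2)))).items.map (fun p => (p.1, p.2.items)) := rfl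
  rw [hA, hB, pvFoldA_eq, pvFoldB_eq]
  obtain ⟨hmap, hnd, hne⟩ :=
    pvInv ((mr.getD []).filter (fun row => !(pvOG row == ""))) PySem.Dict.empty PySem.Dict.empty
      PySem.Dict.nodup_keys_empty (by intro p hp; simp [PySem.Dict.empty] at hp) (by rfl)
  set l := (mr.getD []).filter (fun row => !(pvOG row == "")) with hl
  set bo := l.foldl pvStepA PySem.Dict.empty with hbo
  set bb := l.foldl pvStepB PySem.Dict.empty with hbb
  -- A's second loop inserts each distinct group key once: its items are a map of by_old's items
  have hch : ((bo.items.foldl (fun c p => c.insert p.1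
        (match PySem.List.sorted p.2 mapping_row_priority_py false with
          | r :: _ => r
          | [] => PySem.Dict.empty)) PySem.Dict.empty)).items
      = bo.items.map (fun p => (p.1,
          (match PySem.List.sorted p.2 mapping_row_priority_py false with
            | r :: _ => r
            | [] => PySem.Dict.empty))) := by
    have := PySem.Dict.items_foldl_insert_fresh bo.items (fun p => p.1)
      (fun p => (match PySem.List.sorted p.2 mapping_row_priority_py false with
        | r :: _ => r
        | [] => PySem.Dict.empty)) PySem.Dict.empty
      (fun a _ => PySem.Dict.contains_empty _) hnd
    simpa using this
  -- B's dict comprehension over the distinct keys of best keeps its items unchanged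
  have hkeysbb : (List.map (fun p => (p.1, p.2.2)) bb.items).map (fun q : String × PySem.Dict String String => q.1)
      = bo.keys := by
    rw [hmap]
    simp only [List.map_map, PySem.Dict.keys]
    rfl
  have hndbb : ((bb.items.map (fun p => (p.1, p.2.2))).map (fun q : String × PySem.Dict String String => q.1)).Nodup := by
    rw [hkeysbb]; exact hnd
  have hofl : (PySem.Dict.ofList (bb.items.map (fun p => (p.1, p.2.2)))).items
      = bb.items.map (fun p => (p.1, p.2.2)) := by
    have := PySem.Dict.items_foldl_insert_fresh (bb.items.map (fun p => (p.1, p.2.2)))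
      (fun q => q.1) (fun q => q.2) PySem.Dict.empty
      (fun a _ => PySem.Dict.contains_empty _) hndbb
    simpa [PySem.Dict.ofList, PySem.Dict.update] using this
  rw [hch, hofl, hmap, List.map_map, List.map_map, List.map_map]
  apply List.map_congr_left
  intro p hp
  obtain ⟨x, t, hxt⟩ := List.exists_cons_of_ne_nil (hne p hp)
  have hhead := pvSorted_head x t
  cases hs : PySem.List.sorted (x :: t) mapping_row_priority_py false with
  | nil => rw [hs] at hhead; simp at hhead
  | cons a rest =>
    rw [hs, List.head?_cons, Option.some.injEq] at hhead
    simp only [Function.comp_apply, hxt, pvSel_cons, pvVal, Option.getD_some, hs, hhead]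

-- ===== VERDICT (by name: the statement is the Claim_ definition above) =====
theorem pick_mapping_by_old_group_py_spec : Claim_equal_pick_mapping_by_old_group_py := by
  intro mr _ _
  unfold Spec_pick_mapping_by_old_group_py
  exact pick_mapping_by_old_group_py_spec_aux mr
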